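-- pv_equiv track=rewrite | github.com/luchanos/for_my_shiny_students | dasha_folder/lesson_25.py | over_the_road
-- ===== SOURCE A (Python) =====
-- def over_the_road(address, n):
--     l1 = [el for el in range(1, n * 2) if el % 2]
--     l2 = [el for el in range(1, n * 2 + 1) if el % 2 == 0][::-1]
--     if address % 2:
--         pos = l1.index(address)
--         res = l2[pos]
--     else:
--         pos = l2.index(address)
--         res = l1[pos]
--     return res
-- ===== SOURCE B (Python) =====
-- def over_the_road(address, n):
--     # Opposite houses: odd side 1..2n-1 ascending, even side 2n..2 descending;
--     # paired positions always sum to 2n+1. Addresses off the street are invalid,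
--     # as in the list-based lookup's ValueError.
--     if not 1 <= address <= 2 * n:
--         raise ValueError(f"{address} is not in list")
--     return 2 * n + 1 - address
-- ===== Notes on version B (the rewrite author's own statement) =====
-- stated objective: faster
-- what changed: Replaced building both street-side lists and the linear index/lookup with the closed form 2*n+1-address (plus the same ValueError for addresses off the street).
import Mathlib
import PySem

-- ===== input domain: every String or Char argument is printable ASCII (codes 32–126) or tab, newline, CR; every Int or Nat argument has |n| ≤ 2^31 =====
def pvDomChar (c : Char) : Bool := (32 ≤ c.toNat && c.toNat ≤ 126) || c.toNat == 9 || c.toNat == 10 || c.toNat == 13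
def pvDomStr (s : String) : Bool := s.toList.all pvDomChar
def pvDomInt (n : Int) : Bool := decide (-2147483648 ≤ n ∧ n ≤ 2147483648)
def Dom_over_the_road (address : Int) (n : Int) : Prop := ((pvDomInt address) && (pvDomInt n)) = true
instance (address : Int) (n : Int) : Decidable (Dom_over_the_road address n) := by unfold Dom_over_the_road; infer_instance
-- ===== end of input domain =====

-- B replaces A's two list builds and linear index/lookup with the closed form 2*n+1-address (O(1) instead of O(n)).

-- ===== PORT A =====
def over_the_road (address : Int) (n : Int) : Int :=
  let l1 := (PySem.List.pyRange 1 (n * 2) 1).filter (fun el => PySem.Int.mod el 2 != 0)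
  -- [::-1] on a list is reversal (PySem.List.slice?_none_none_neg_one)
  let l2 := ((PySem.List.pyRange 1 (n * 2 + 1) 1).filter (fun el => PySem.Int.mod el 2 == 0)).reverse
  if PySem.Int.mod address 2 != 0 then
    match PySem.List.index? l1 address with
    | some pos => PySem.List.pyGetD l2 (pos : Int) 0   -- l2[pos]
    | none => 0                                        -- l1.index raises ValueError; excluded by Pre_
  else
    match PySem.List.index? l2 address with
    | some pos => PySem.List.pyGetD l1 (pos : Int) 0   -- l1[pos]
    | none => 0                                        -- l2.index raises ValueError; excluded by Pre_

-- ===== PORT B =====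
def over_the_road_alt (address : Int) (n : Int) : Int :=
  if 1 ≤ address ∧ address ≤ 2 * n then 2 * n + 1 - address
  else 0  -- raise ValueError: address not on the street; excluded by Pre_

-- ===== PRECONDITION & SPEC =====
-- A raises ValueError exactly when address is outside the street 1..2n (in particular whenever n ≤ 0).
def Pre_over_the_road (address : Int) (n : Int) : Prop := 1 ≤ address ∧ address ≤ 2 * n
instance (address : Int) (n : Int) : Decidable (Pre_over_the_road address n) := by unfold Pre_over_the_road; infer_instance
def pvWitness_over_the_road : Int × Int := (7, 10)

def Spec_over_the_road (address : Int) (n : Int) (out : Int) : Prop := out = over_the_road_alt address n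
instance (address : Int) (n : Int) (out : Int) : Decidable (Spec_over_the_road address n out) := by unfold Spec_over_the_road; infer_instance

-- ===== CLAIM (what is proved, stated in full; the proofs are below) =====
def Claim_equal_over_the_road : Prop := ∀ (address : Int) (n : Int), Dom_over_the_road address n → Pre_over_the_road address n → Spec_over_the_road address n (over_the_road address n)

-- ===== LEMMAS AND PROOFS =====

-- odds of range(1, 2m) are [1, 3, ..., 2m-1]
lemma filter_odd_pyRange (m : Nat) :
    (PySem.List.pyRange 1 (2 * (m : Int)) 1).filter (fun el => PySem.Int.mod el 2 != 0)
      = (List.range m).map (fun k : Nat => 2 * (k : Int) + 1) := by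
  induction m with
  | zero =>
    simp
  | succ m ih =>
    rcases Nat.eq_zero_or_pos m with hm0 | hmpos
    · subst hm0; decide
    have h1 : (2 * ((m + 1 : Nat) : Int)) = (2 * (m : Int) + 1) + 1 := by push_cast; ring
    rw [h1, PySem.List.pyRange_one_succ_right (a := 1) (b := 2 * (m : Int) + 1) (by omega),
        PySem.List.pyRange_one_succ_right (a := 1) (b := 2 * (m : Int)) (by omega),
        List.filter_append, List.filter_append, ih, List.range_succ]
    have he : (PySem.Int.mod (2 * (m : Int)) 2 != 0) = false := by
      rw [PySem.Int.mod_eq_emod_of_pos (by omega)]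
      have h : (2 * (m : Int)) % 2 = 0 := by omega
      simp [h]
    have ho : (PySem.Int.mod (2 * (m : Int) + 1) 2 != 0) = true := by
      rw [PySem.Int.mod_eq_emod_of_pos (by omega)]
      have h : (2 * (m : Int) + 1) % 2 = 1 := by omega
      simp [h]
    rw [List.filter_singleton, List.filter_singleton, he, ho]
    simp

-- evens of range(1, 2m+1) are [2, 4, ..., 2m]
lemma filter_even_pyRange (m : Nat) :
    (PySem.List.pyRange 1 (2 * (m : Int) + 1) 1).filter (fun el => PySem.Int.mod el 2 == 0)
      = (List.range m).map (fun k : Nat => 2 * (k : Int) + 2) := by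
  induction m with
  | zero =>
    simp
  | succ m ih =>
    have h1 : (2 * ((m + 1 : Nat) : Int) + 1) = ((2 * (m : Int) + 1) + 1) + 1 := by push_cast; ring
    rw [h1, PySem.List.pyRange_one_succ_right (a := 1) (b := 2 * (m : Int) + 1 + 1) (by omega),
        PySem.List.pyRange_one_succ_right (a := 1) (b := 2 * (m : Int) + 1) (by omega),
        List.filter_append, List.filter_append, ih, List.range_succ]
    have he : (PySem.Int.mod (2 * (m : Int) + 1 + 1) 2 == 0) = true := by
      rw [PySem.Int.mod_eq_emod_of_pos (by omega)]
      have h : (2 * (m : Int) + 1 + 1) % 2 = 0 := by omega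
      simp [h]
    have ho : (PySem.Int.mod (2 * (m : Int) + 1) 2 == 0) = false := by
      rw [PySem.Int.mod_eq_emod_of_pos (by omega)]
      have h : (2 * (m : Int) + 1) % 2 = 1 := by omega
      simp [h]
    rw [List.filter_singleton, List.filter_singleton, he, ho]
    simp
    ring

lemma reverse_map_range {α : Type} (g : Nat → α) (m : Nat) :
    ((List.range m).map g).reverse = (List.range m).map (fun k => g (m - 1 - k)) := by
  apply List.ext_getElem (by simp)
  intro i h1 h2
  simp only [List.length_map, List.length_range] at h1 h2
  rw [List.getElem_reverse]
  simp

lemma index?_map_range (f : Nat → Int) (m j : Nat) (hj : j < m)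
    (hinj : ∀ i k, i < k → k < m → f i ≠ f k) :
    PySem.List.index? ((List.range m).map f) (f j) = some j := by
  rw [PySem.List.index?_eq_some_iff]
  refine ⟨(List.range j).map f, (List.range (m - (j + 1))).map (fun k => f (j + 1 + k)), ?_, by simp, ?_⟩
  · have hmj : m = j + 1 + (m - (j + 1)) := by omega
    rw [hmj, List.range_add, List.range_succ]
    simp [Function.comp_def, List.append_assoc]
  · simp only [List.mem_map, List.mem_range]
    rintro ⟨k, hk, hfk⟩
    exact hinj k j hk hj hfk

theorem over_the_road_eq (address n : Int) (hpre : Pre_over_the_road address n) :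
    over_the_road address n = over_the_road_alt address n := by
  obtain ⟨h1, h2⟩ := hpre
  set m : Nat := n.toNat with hm
  have hn : n = (m : Int) := by omega
  have hfo := filter_odd_pyRange m
  have hfe := filter_even_pyRange m
  simp only [over_the_road, over_the_road_alt]
  rw [if_pos (⟨h1, h2⟩ : 1 ≤ address ∧ address ≤ 2 * n)]
  have hrw1 : n * 2 = 2 * (m : Int) := by omega
  rw [hrw1, hfo, hfe, reverse_map_range]
  have hmod : PySem.Int.mod address 2 = address % 2 := PySem.Int.mod_eq_emod_of_pos (by omega)
  by_cases hodd : address % 2 = 1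
  · -- odd address: position j with address = 2j+1; opposite = 2m - 2j = 2n+1-address
    have hj : ∃ j : Nat, address = 2 * (j : Int) + 1 ∧ j < m := by
      refine ⟨((address - 1) / 2).toNat, by omega, by omega⟩
    obtain ⟨j, hja, hjm⟩ := hj
    have hb : (PySem.Int.mod address 2 != 0) = true := by rw [hmod, hodd]; decide
    rw [hb]
    simp only [if_true]
    have : address = (fun k : Nat => 2 * (k : Int) + 1) j := by simpa using hja
    rw [this, index?_map_range _ m j hjm (by intro i k hik hkm; simp; omega)]
    simp only
    rw [PySem.List.pyGetD_natCast]
    rw [List.getD_eq_getElem _ _ (by simpa using hjm)]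
    simp only [List.getElem_map, List.getElem_range]
    have : (↑(m - 1 - j) : Int) = (m : Int) - 1 - j := by omega
    rw [this]; omega
  · -- even address: address = 2m - 2i at position i; opposite = 2i+1 = 2n+1-address
    have heven : address % 2 = 0 := by omega
    have hi : ∃ i : Nat, address = 2 * (m : Int) - 2 * (i : Int) ∧ i < m := by
      refine ⟨((m : Int) - address / 2).toNat, by omega, by omega⟩
    obtain ⟨i, hia, him⟩ := hi
    have hb : (PySem.Int.mod address 2 != 0) = false := by rw [hmod, heven]; decide
    rw [hb]
    simp only [if_false, Bool.false_eq_true]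
    have hG : address = (fun k => 2 * ((m - 1 - k : Nat) : Int) + 2) i := by
      simp only
      have : ((m - 1 - i : Nat) : Int) = (m : Int) - 1 - i := by omega
      rw [this]; omega
    rw [hG, index?_map_range _ m i him ?_]
    · simp only
      rw [PySem.List.pyGetD_natCast]
      rw [List.getD_eq_getElem _ _ (by simpa using him)]
      simp only [List.getElem_map, List.getElem_range]
      omega
    · intro a b hab hbm
      simp only [ne_eq]
      have h1 : ((m - 1 - a : Nat) : Int) = (m : Int) - 1 - a := by omega
      have h2 : ((m - 1 - b : Nat) : Int) = (m : Int) - 1 - b := by omega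
      rw [h1, h2]; omega

-- ===== VERDICT (by name: the statement is the Claim_ definition above) =====
theorem over_the_road_spec : Claim_equal_over_the_road := by
  intro address n _ hpre
  unfold Spec_over_the_road
  exact over_the_road_eq address n hpre
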